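-- pv_equiv track=rewrite | github.com/manvi0308/100DaysOfAlgo | Day 4/FirstComeFirstServe.py | is_first_come_first_serve
-- ===== SOURCE A (Python) =====
-- def is_first_come_first_serve(take_out_orders , dine_in_orders , served_orders):
--
--     if len(served_orders) == 0:
--         return True
--
--     if len(take_out_orders) and take_out_orders[0] == served_orders[0]:
--         return is_first_come_first_serve(take_out_orders[1:],dine_in_orders,served_orders[1:])
--
--     elif len(dine_in_orders) and dine_in_orders[0] == served_orders[0]:
--         return is_first_come_first_serve(take_out_orders ,dine_in_orders[1:],served_orders[1:])
--
--     else: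
--         return False
-- ===== SOURCE B (Python) =====
-- def is_first_come_first_serve(take_out_orders, dine_in_orders, served_orders):
--     i = j = 0
--     for order in served_orders:
--         if i < len(take_out_orders) and take_out_orders[i] == order:
--             i += 1
--         elif j < len(dine_in_orders) and dine_in_orders[j] == order:
--             j += 1
--         else:
--             return False
--     return True
-- ===== Notes on version B (the rewrite author's own statement) =====
-- stated objective: faster
-- what changed: Replaced the quadratic recursion that slices fresh copies of all three lists at every step with a single iterative pass over served_orders that advances two integer pointers into the unchanged queues.
import Mathlib
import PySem

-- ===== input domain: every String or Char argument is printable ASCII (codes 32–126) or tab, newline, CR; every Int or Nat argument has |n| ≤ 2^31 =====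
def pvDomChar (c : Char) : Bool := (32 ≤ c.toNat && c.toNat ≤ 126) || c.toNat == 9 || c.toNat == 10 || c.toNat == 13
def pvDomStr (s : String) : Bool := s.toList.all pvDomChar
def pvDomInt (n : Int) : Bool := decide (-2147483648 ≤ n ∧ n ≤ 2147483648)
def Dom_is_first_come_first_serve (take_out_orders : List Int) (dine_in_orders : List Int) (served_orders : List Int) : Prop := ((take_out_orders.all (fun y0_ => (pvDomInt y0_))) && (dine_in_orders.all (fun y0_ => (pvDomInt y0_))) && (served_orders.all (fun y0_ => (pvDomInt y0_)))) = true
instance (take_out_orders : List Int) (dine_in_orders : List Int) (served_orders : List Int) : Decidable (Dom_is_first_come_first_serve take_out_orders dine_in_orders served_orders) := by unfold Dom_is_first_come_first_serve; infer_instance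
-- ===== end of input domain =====

-- B replaces A's slice-and-recurse (quadratic) with one pass over served_orders and two index pointers.
-- ===== PORT A =====
-- A: recursion; "len(t) and t[0] == s[0]" is head? = some s0, the slices [1:] are `drop 1`.
def is_first_come_first_serve (take_out_orders : List Int) (dine_in_orders : List Int) (served_orders : List Int) : Bool :=
  match served_orders with
  | [] => true
  | s0 :: srest =>
    if take_out_orders.head? = some s0 then
      is_first_come_first_serve (take_out_orders.drop 1) dine_in_orders srest
    else if dine_in_orders.head? = some s0 then
      is_first_come_first_serve take_out_orders (dine_in_orders.drop 1) srest
    else false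

-- ===== PORT B =====
-- B's loop over served_orders with pointers i, j; "i < len(t) and t[i] == o" is t[i]? = some o.
def fcfsGo (t d : List Int) (i j : Nat) : List Int → Bool
  | [] => true
  | o :: rest =>
    if t[i]? = some o then fcfsGo t d (i+1) j rest
    else if d[j]? = some o then fcfsGo t d i (j+1) rest
    else false

def is_first_come_first_serve_alt (take_out_orders : List Int) (dine_in_orders : List Int) (served_orders : List Int) : Bool :=
  fcfsGo take_out_orders dine_in_orders 0 0 served_orders

-- ===== PRECONDITION & SPEC =====
def Spec_is_first_come_first_serve (take_out_orders : List Int) (dine_in_orders : List Int) (served_orders : List Int) (out : Bool) : Prop := out = is_first_come_first_serve_alt take_out_orders dine_in_orders served_orders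
instance (take_out_orders : List Int) (dine_in_orders : List Int) (served_orders : List Int) (out : Bool) : Decidable (Spec_is_first_come_first_serve take_out_orders dine_in_orders served_orders out) := by unfold Spec_is_first_come_first_serve; infer_instance

-- ===== CLAIM (what is proved, stated in full; the proofs are below) =====
def Claim_equal_is_first_come_first_serve : Prop := ∀ (take_out_orders : List Int) (dine_in_orders : List Int) (served_orders : List Int), Dom_is_first_come_first_serve take_out_orders dine_in_orders served_orders → Spec_is_first_come_first_serve take_out_orders dine_in_orders served_orders (is_first_come_first_serve take_out_orders dine_in_orders served_orders)

-- ===== LEMMAS AND PROOFS =====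
theorem fcfsGo_eq_drop (t d : List Int) (s : List Int) : ∀ (i j : Nat),
    fcfsGo t d i j s = is_first_come_first_serve (t.drop i) (d.drop j) s := by
  induction s with
  | nil => intro i j; rfl
  | cons o rest ih =>
    intro i j
    simp only [fcfsGo, is_first_come_first_serve, List.head?_drop, List.drop_drop]
    split
    · rw [ih]
    · split
      · rw [ih]
      · rfl

-- ===== VERDICT (by name: the statement is the Claim_ definition above) =====
theorem is_first_come_first_serve_spec : Claim_equal_is_first_come_first_serve := by
  intro t d s _
  unfold Spec_is_first_come_first_serve is_first_come_first_serve_alt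
  rw [fcfsGo_eq_drop]
  simp
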